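-- pv_equiv track=rewrite | github.com/benadi/WEEK2-CHALLENGE2 | vowels.py | vowels
-- ===== SOURCE A (Python) =====
-- def vowels(list_string1):
-- 	list_2 = list_string1.lower().split(' ')
-- 	empty_string = " "
-- 	for wordds in list_2:
-- 		empty_string+=wordds
-- 	vowels = ["a", "e", "i", "o", "u"]
-- 	strint_vowels = [vowel for vowel in vowels if vowel in empty_string]
-- 	string_for_vowels = " "
-- 	for vowel in strint_vowels:
-- 		string_for_vowels += vowel
-- 	duplicates = []
-- 	duplicate = [duplicates.append(letter) for letter in empty_string if empty_string.count(letter) > 1 and letter not in duplicates]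
-- 	result = (string_for_vowels, len(duplicates))
-- 	return result
-- ===== SOURCE B (Python) =====
-- def vowels(list_string1):
--     text = " " + "".join(list_string1.lower().split(' '))
--     counts = {}
--     for ch in text:
--         counts[ch] = counts.get(ch, 0) + 1
--     string_for_vowels = " " + "".join(v for v in "aeiou" if counts.get(v, 0) > 0)
--     duplicate_count = sum(1 for k in counts.values() if k > 1)
--     return (string_for_vowels, duplicate_count)
-- ===== Notes on version B (the rewrite author's own statement) =====
-- stated objective: faster
-- what changed: Replaces A's per-letter text.count scan (quadratic) and list-membership dedup with a single counting-dict pass over the text; vowels and the duplicate count are read off the dict.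
import Mathlib
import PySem

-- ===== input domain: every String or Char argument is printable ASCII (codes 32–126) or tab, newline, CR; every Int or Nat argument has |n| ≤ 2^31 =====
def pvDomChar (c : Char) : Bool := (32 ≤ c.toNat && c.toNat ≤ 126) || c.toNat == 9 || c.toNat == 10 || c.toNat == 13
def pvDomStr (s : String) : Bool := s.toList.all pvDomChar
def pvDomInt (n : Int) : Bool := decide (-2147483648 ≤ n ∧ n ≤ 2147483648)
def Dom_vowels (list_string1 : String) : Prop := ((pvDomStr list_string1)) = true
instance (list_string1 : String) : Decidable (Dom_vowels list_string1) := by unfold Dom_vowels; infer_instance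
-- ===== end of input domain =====

-- ===== PORT A =====
-- B replaces A's per-letter substring-count scans and list-membership dedup by one counting-dict pass (faster).
def vowels (list_string1 : String) : String × Int :=
  let list_2 : List (List Char) := PySem.Chars.splitOn (PySem.Chars.lower list_string1.toList) [' ']
  let empty_string : List Char := list_2.foldl (fun acc w => acc ++ w) [' ']
  let vs : List (List Char) := [['a'], ['e'], ['i'], ['o'], ['u']]
  let strint_vowels : List (List Char) := vs.filter (fun v => PySem.Chars.isIn v empty_string)
  let string_for_vowels : List Char := strint_vowels.foldl (fun acc v => acc ++ v) [' ']
  let duplicates : List Char := empty_string.foldl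
    (fun d letter =>
      if PySem.Chars.count empty_string [letter] > 1 && !(d.contains letter) then d ++ [letter] else d) []
  (String.ofList string_for_vowels, (duplicates.length : Int))

-- ===== PORT B =====
def vowels_alt (list_string1 : String) : String × Int :=
  let text : List Char := ' ' :: (PySem.Chars.splitOn (PySem.Chars.lower list_string1.toList) [' ']).flatten
  let counts : PySem.Dict Char Int :=
    text.foldl (fun d ch => d.insert ch (d.getD ch 0 + 1)) PySem.Dict.empty
  let string_for_vowels : List Char :=
    ' ' :: (['a', 'e', 'i', 'o', 'u'].filter (fun v => counts.getD v 0 > 0))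
  let duplicate_count : Int :=
    counts.values.foldl (fun acc k => if k > 1 then acc + 1 else acc) 0
  (String.ofList string_for_vowels, duplicate_count)

-- ===== PRECONDITION & SPEC =====
def Spec_vowels (list_string1 : String) (out : String × Int) : Prop := out = vowels_alt list_string1
instance (list_string1 : String) (out : String × Int) : Decidable (Spec_vowels list_string1 out) := by unfold Spec_vowels; infer_instance

-- ===== CLAIM (what is proved, stated in full; the proofs are below) =====
def Claim_equal_vowels : Prop := ∀ (list_string1 : String), Dom_vowels list_string1 → Spec_vowels list_string1 (vowels list_string1)

-- ===== LEMMAS AND PROOFS =====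

-- counting a single-character substring is counting the character
theorem chars_count_go_singleton (c : Char) : ∀ (fuel : Nat) (t : List Char) (acc : Nat),
    t.length ≤ fuel → PySem.Chars.count.go [c] fuel t acc = acc + t.count c := by
  intro fuel
  induction fuel with
  | zero => intro t acc h; cases t with
    | nil => simp [PySem.Chars.count.go]
    | cons h t => simp at h
  | succ n ih =>
    intro t acc h
    cases t with
    | nil => simp [PySem.Chars.count.go]
    | cons x xs =>
      simp only [List.length_cons] at h
      by_cases hx : c = x
      · subst hx
        simp [PySem.Chars.count.go, List.isPrefixOf, ih xs (acc + 1) (by omega)]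
        omega
      · simp [PySem.Chars.count.go, List.isPrefixOf, hx, ih xs acc (by omega), Ne.symm hx]

theorem chars_count_singleton (s : List Char) (c : Char) :
    PySem.Chars.count s [c] = s.count c := by
  simp [PySem.Chars.count, chars_count_go_singleton c s.length s 0 le_rfl]

-- single-character membership
theorem chars_isIn_singleton (c : Char) (s : List Char) :
    PySem.Chars.isIn [c] s = decide (c ∈ s) := by
  by_cases h : c ∈ s
  · simp only [h, decide_true]
    rw [PySem.Chars.isIn_iff_infix]
    obtain ⟨l, r, rfl⟩ := List.append_of_mem h
    exact ⟨l, r, by simp⟩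
  · simp only [h, decide_false]
    rw [PySem.Chars.isIn_eq_false_iff]
    intro hinf
    exact h (hinf.subset (by simp))

-- A's dedup-append loop is a Set.add fold over the filtered list
theorem dup_loop_eq_set_fold (q : Char → Bool) : ∀ (xs : List Char) (acc : List Char),
    xs.foldl (fun d l => if q l && !(d.contains l) then d ++ [l] else d) acc
      = (xs.filter q).foldl PySem.Set.add acc := by
  intro xs
  induction xs with
  | nil => intro acc; rfl
  | cons x t ih =>
    intro acc
    rw [List.foldl_cons, List.filter_cons]
    by_cases hq : q x = true
    · have h1 : (if (q x && !acc.contains x) = true then acc ++ [x] else acc)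
          = PySem.Set.add acc x := by
        simp [hq, PySem.Set.add, PySem.Set.contains]
      rw [h1, if_pos hq, List.foldl_cons, ih]
    · have hqf : q x = false := by simpa using hq
      have h1 : (if (q x && !acc.contains x) = true then acc ++ [x] else acc) = acc := by
        simp [hqf]
      rw [h1, if_neg (by simp [hqf]), ih]

-- Set.ofList commutes with filter
theorem set_fold_filter (q : Char → Bool) : ∀ (xs : List Char) (acc : List Char),
    (xs.filter q).foldl PySem.Set.add (acc.filter q) = (xs.foldl PySem.Set.add acc).filter q := by
  intro xs
  induction xs with
  | nil => intro acc; rfl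
  | cons x t ih =>
    intro acc
    rw [List.foldl_cons, List.filter_cons]
    by_cases hq : q x = true
    · rw [if_pos hq, List.foldl_cons]
      have h1 : PySem.Set.add (acc.filter q) x = (PySem.Set.add acc x).filter q := by
        by_cases hm : x ∈ acc
        · have hmf : x ∈ acc.filter q := List.mem_filter.2 ⟨hm, hq⟩
          simp [PySem.Set.add, PySem.Set.contains, hm, hmf]
        · have hmf : x ∉ acc.filter q := fun h => hm (List.mem_filter.1 h).1
          simp [PySem.Set.add, PySem.Set.contains, hm, hmf, List.filter_append, hq]
      rw [h1, ih]
    · have hqf : q x = false := by simpa using hq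
      rw [if_neg (by simp [hqf])]
      have h1 : acc.filter q = (PySem.Set.add acc x).filter q := by
        by_cases hm : x ∈ acc <;>
          simp [PySem.Set.add, PySem.Set.contains, hm, List.filter_append, hqf]
      rw [h1, ih]

-- flattening a list of singletons is the identity
theorem flatten_map_singleton {α : Type} (l : List α) : (l.map (fun c => [c])).flatten = l := by
  induction l with
  | nil => rfl
  | cons x t ih => simp [ih]

-- the counting-dict loop of B is PySem.Dict.counter (definitional) and its keys are Set.ofList
theorem counter_keys (cs : List Char) :
    (cs.foldl (fun d ch => d.insert ch (d.getD ch 0 + 1)) (PySem.Dict.empty : PySem.Dict Char Int)).keys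
      = PySem.Set.ofList cs := by
  rw [PySem.Dict.keys_foldl_insert_key cs (fun c => c) (fun d ch => d.getD ch 0 + 1) PySem.Dict.empty]
  simp [PySem.Set.ofList_eq_foldl, PySem.Set.update, PySem.Dict.keys,
    PySem.Dict.empty]

-- ===== VERDICT (by name: the statement is the Claim_ definition above) =====
theorem vowels_spec : Claim_equal_vowels := by
  intro s _
  unfold Spec_vowels vowels vowels_alt
  simp only [PySem.List.foldl_append_eq_flatten, List.singleton_append]
  set cs : List Char := ' ' :: (PySem.Chars.splitOn (PySem.Chars.lower s.toList) [' ']).flatten with hcs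
  have hcounter : (cs.foldl (fun d ch => d.insert ch (d.getD ch 0 + 1))
      (PySem.Dict.empty : PySem.Dict Char Int)) = PySem.Dict.counter cs := rfl
  have hkeys := counter_keys cs
  rw [hcounter] at hkeys
  -- first components
  have hfst : ' ' :: ([['a'], ['e'], ['i'], ['o'], ['u']].filter
        (fun v => PySem.Chars.isIn v cs)).flatten
      = ' ' :: (['a', 'e', 'i', 'o', 'u'].filter
        (fun v => (PySem.Dict.counter cs).getD v 0 > 0)) := by
    have hlit : [['a'], ['e'], ['i'], ['o'], ['u']]
        = ['a', 'e', 'i', 'o', 'u'].map (fun c => [c]) := rfl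
    rw [hlit, List.filter_map, flatten_map_singleton]
    congr 1
    apply List.filter_congr
    intro c _
    simp only [Function.comp_apply, chars_isIn_singleton, PySem.Dict.getD_counter]
    simp [List.count_pos_iff]
  -- second components
  have hsnd : (((cs.foldl (fun d letter =>
        if PySem.Chars.count cs [letter] > 1 && !(d.contains letter) then d ++ [letter] else d)
        []).length : Nat) : Int)
      = (PySem.Dict.counter cs).values.foldl (fun acc k => if k > 1 then acc + 1 else acc) 0 := by
    rw [dup_loop_eq_set_fold (fun l => PySem.Chars.count cs [l] > 1) cs []]
    have h0 := set_fold_filter (fun l => PySem.Chars.count cs [l] > 1) cs []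
    simp only [List.filter_nil] at h0
    rw [h0, ← PySem.Set.ofList_eq_foldl, ← List.countP_eq_length_filter]
    rw [PySem.Dict.values_eq_map_keys _ (hkeys ▸ PySem.Set.nodup_ofList cs) 0, hkeys]
    rw [PySem.List.foldl_ite_add_one (fun k => k > 1)]
    rw [List.countP_map]
    rw [zero_add]
    congr 1
    apply List.countP_congr
    intro c _
    simp [chars_count_singleton, PySem.Dict.getD_counter]
  rw [Prod.mk.injEq]
  exact ⟨congrArg String.ofList hfst, hsnd ▸ rfl⟩
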